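-- pv_equiv track=rewrite | github.com/philipphager/faceted-domain-encoder | experiments/ablation/util/data.py | _drop_message
-- ===== SOURCE A (Python) =====
-- def _drop_message(text):
--     # List of auto.reply fragments that we identified manually, might be incomplete
--     messages = [
--         'Auto forwarded by a Rule',
--         '** Security Notice',
--         '(c) 2012 Rolls-Royce plc Registered office',
--         'An e-mail response to this address may be subject to interception or monitoring',
--         'This e-mail and any attachments may contain confidential or privileged information',
--         'Confidential Communication',
--         'confidential',
--     ]
--
--     return any([m in text for m in messages])
-- ===== SOURCE B (Python) =====
-- MESSAGES = (
--     'Auto forwarded by a Rule',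
--     '** Security Notice',
--     '(c) 2012 Rolls-Royce plc Registered office',
--     'An e-mail response to this address may be subject to interception or monitoring',
--     'This e-mail and any attachments may contain confidential or privileged information',
--     'Confidential Communication',
--     'confidential',
-- )
--
--
-- def _drop_message(text):
--     # One left-to-right sweep: at each position, test whether any fragment starts there.
--     for i in range(len(text) + 1):
--         for m in MESSAGES:
--             if text.startswith(m, i):
--                 return True
--     return False
-- ===== Notes on version B (the rewrite author's own statement) =====
-- stated objective: alternative
-- what changed: A runs seven independent membership substring scans (one per fragment) and any()s the results; B makes one left-to-right sweep over the text, testing at each position whether any fragment starts there (a prefix check per position).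
import Mathlib
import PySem

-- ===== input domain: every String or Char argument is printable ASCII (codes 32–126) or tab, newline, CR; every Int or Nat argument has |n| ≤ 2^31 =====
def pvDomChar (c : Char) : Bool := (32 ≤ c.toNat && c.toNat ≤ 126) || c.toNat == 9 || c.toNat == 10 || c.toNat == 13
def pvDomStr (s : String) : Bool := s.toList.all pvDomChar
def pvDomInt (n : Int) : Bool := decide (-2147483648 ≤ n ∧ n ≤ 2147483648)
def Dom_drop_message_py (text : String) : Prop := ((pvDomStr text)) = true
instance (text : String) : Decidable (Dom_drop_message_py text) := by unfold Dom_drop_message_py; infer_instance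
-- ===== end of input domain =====

-- B replaces A's seven independent substring scans by one left-to-right sweep that tests,
-- at each position, whether a fragment starts there (objective: alternative traversal).

-- ===== PORT A =====
-- A: any([m in text for m in messages]) over its local fragment list.
def drop_message_py (text : String) : Bool :=
  let messages : List String :=
    [ "Auto forwarded by a Rule",
      "** Security Notice",
      "(c) 2012 Rolls-Royce plc Registered office",
      "An e-mail response to this address may be subject to interception or monitoring",
      "This e-mail and any attachments may contain confidential or privileged information",
      "Confidential Communication",
      "confidential" ]
  (messages.map (fun m => PySem.Str.isIn m text)).any id

-- ===== PORT B =====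
-- B's module-level MESSAGES tuple.
def pvMESSAGES : List String :=
  [ "Auto forwarded by a Rule",
    "** Security Notice",
    "(c) 2012 Rolls-Royce plc Registered office",
    "An e-mail response to this address may be subject to interception or monitoring",
    "This e-mail and any attachments may contain confidential or privileged information",
    "Confidential Communication",
    "confidential" ]

-- B's sweep: for i in range(len(text)+1): if text.startswith(m, i) for some m → True.
-- Recursion on the suffix text[i:]; text.startswith(m, i) is the prefix test on that suffix.
def pvScan (msgs : List (List Char)) : List Char → Bool
  | [] => msgs.any (fun m => m.isPrefixOf ([] : List Char))
  | c :: rest => msgs.any (fun m => m.isPrefixOf (c :: rest)) || pvScan msgs rest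

def drop_message_py_alt (text : String) : Bool :=
  pvScan (pvMESSAGES.map String.toList) text.toList

-- ===== PRECONDITION & SPEC =====
def Spec_drop_message_py (text : String) (out : Bool) : Prop := out = drop_message_py_alt text
instance (text : String) (out : Bool) : Decidable (Spec_drop_message_py text out) := by unfold Spec_drop_message_py; infer_instance

-- ===== CLAIM (what is proved, stated in full; the proofs are below) =====
def Claim_equal_drop_message_py : Prop := ∀ (text : String), Dom_drop_message_py text → Spec_drop_message_py text (drop_message_py text)

-- ===== LEMMAS AND PROOFS =====

-- A fragment starts somewhere in c :: rest iff it starts at the head or somewhere in rest.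
lemma pv_exists_drop_cons (m : List Char) (c : Char) (rest : List Char) :
    (∃ j, m <+: (c :: rest).drop j) ↔ (m <+: c :: rest ∨ ∃ j, m <+: rest.drop j) := by
  constructor
  · rintro ⟨j, hj⟩
    cases j with
    | zero => exact Or.inl (by simpa using hj)
    | succ j' => exact Or.inr ⟨j', by simpa using hj⟩
  · rintro (h | ⟨j, hj⟩)
    · exact ⟨0, by simpa using h⟩
    · exact ⟨j + 1, by simpa using hj⟩

-- B's sweep finds exactly the fragments that are a prefix of some suffix.
lemma pvScan_true_iff (msgs : List (List Char)) (s : List Char) :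
    pvScan msgs s = true ↔ ∃ m ∈ msgs, ∃ j, m <+: s.drop j := by
  induction s with
  | nil => simp [pvScan, List.isPrefixOf_iff_prefix]
  | cons c rest ih =>
      simp only [pvScan, Bool.or_eq_true, List.any_eq_true, List.isPrefixOf_iff_prefix, ih]
      constructor
      · rintro (⟨m, hm, h⟩ | ⟨m, hm, j, hj⟩)
        · exact ⟨m, hm, (pv_exists_drop_cons m c rest).2 (Or.inl h)⟩
        · exact ⟨m, hm, (pv_exists_drop_cons m c rest).2 (Or.inr ⟨j, hj⟩)⟩
      · rintro ⟨m, hm, hex⟩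
        rcases (pv_exists_drop_cons m c rest).1 hex with h | ⟨j, hj⟩
        · exact Or.inl ⟨m, hm, h⟩
        · exact Or.inr ⟨m, hm, j, hj⟩

-- ===== VERDICT (by name: the statement is the Claim_ definition above) =====
theorem drop_message_py_spec : Claim_equal_drop_message_py := by
  intro text _
  show drop_message_py text = drop_message_py_alt text
  rw [Bool.eq_iff_iff]
  simp only [drop_message_py, drop_message_py_alt, List.any_map, List.any_eq_true,
    Function.comp, id_eq, pvScan_true_iff, List.mem_map]
  constructor
  · rintro ⟨m, hm, hin⟩
    exact ⟨m.toList, ⟨m, hm, rfl⟩,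
      (PySem.Chars.exists_prefix_drop_iff_isIn m.toList text.toList).2 (by simpa using hin)⟩
  · rintro ⟨_, ⟨m, hm, rfl⟩, hex⟩
    exact ⟨m, hm, by
      simpa using (PySem.Chars.exists_prefix_drop_iff_isIn m.toList text.toList).1 hex⟩
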